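-- pv_equiv track=rewrite | github.com/violet-luo/leetcode | 5_hash_map/Google OA. Num of Max Sum Pair.py | max_sum_pair
-- ===== SOURCE A (Python) =====
-- def max_sum_pair(A):
--     hash = {}
--     for i in range(len(A)):
--         for j in range(i+1,len(A)):
--             if A[i] + A[j] not in hash:
--                 hash[A[i] + A[j]] = [i,j]
--             elif i not in hash[A[i] + A[j]] and j not in hash[A[i] + A[j]]:
--                 hash[A[i] + A[j]].append(i)
--                 hash[A[i] + A[j]].append(j)
--
--     max_len = 0
--     for i in hash:
--         if len(hash[i]) > max_len:
--             max_len = len(hash[i])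
--     return max_len//2
-- ===== SOURCE B (Python) =====
-- def max_sum_pair(A):
--     n = len(A)
--     # Phase 1: bucket all pairs (i, j), i < j, by their sum, in order.
--     cand = {}
--     for i in range(n):
--         for j in range(i + 1, n):
--             cand.setdefault(A[i] + A[j], []).append((i, j))
--     # Phase 2: per sum, greedily accept pairs with fresh indices and count them.
--     best = 0
--     for pairs in cand.values():
--         used = set()
--         count = 0
--         for (i, j) in pairs:
--             if i not in used and j not in used:
--                 used.add(i)
--                 used.add(j)
--                 count += 1
--         best = max(best, count)
--     return best
-- ===== Notes on version B (the rewrite author's own statement) =====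
-- stated objective: faster
-- what changed: A interleaves bucketing and greedy matching in one dict of flat index lists, testing index freshness by scanning the per-sum list, and returns max len//2; B first buckets all i<j pairs by sum, then runs a separate greedy pass per sum with a used-index set and a direct pair counter, taking the max counter.
import Mathlib
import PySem

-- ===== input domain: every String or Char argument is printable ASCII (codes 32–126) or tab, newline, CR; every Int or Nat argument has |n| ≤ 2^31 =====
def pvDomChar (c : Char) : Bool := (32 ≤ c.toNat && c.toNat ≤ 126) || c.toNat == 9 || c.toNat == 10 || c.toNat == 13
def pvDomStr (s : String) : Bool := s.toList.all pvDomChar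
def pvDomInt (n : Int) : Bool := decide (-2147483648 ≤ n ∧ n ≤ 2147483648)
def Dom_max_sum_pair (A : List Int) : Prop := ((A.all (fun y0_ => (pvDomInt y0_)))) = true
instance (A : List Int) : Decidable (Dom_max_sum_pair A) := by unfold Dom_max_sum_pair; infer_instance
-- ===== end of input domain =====

-- B separates A's interleaved dict-building/greedy into two phases: bucket all i<j pairs
-- by sum, then a per-sum greedy pass counting matched pairs directly, with a used-index
-- set replacing A's per-sum list-membership scans (measured faster in a timing run).


-- ===== PORT A =====
def max_sum_pair (A : List Int) : Int :=
  let n : Int := (A.length : Int)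
  let hash : PySem.Dict Int (List Int) :=
    (PySem.List.pyRange 0 n 1).foldl (fun h i =>
      (PySem.List.pyRange (i + 1) n 1).foldl (fun h j =>
        let s := PySem.List.pyGetD A i 0 + PySem.List.pyGetD A j 0
        if h.contains s then
          if !((h.getD s []).contains i) && !((h.getD s []).contains j) then
            h.insert s (h.getD s [] ++ [i] ++ [j])
          else h
        else h.insert s [i, j]) h) PySem.Dict.empty
  let max_len : Int :=
    hash.keys.foldl (fun m k =>
      if ((hash.getD k []).length : Int) > m then ((hash.getD k []).length : Int) else m) 0
  PySem.Int.floordiv max_len 2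

-- ===== PORT B =====
def msp_greedyCount (pairs : List (Int × Int)) : Int :=
  let st := pairs.foldl (fun (st : PySem.Set Int × Int) p =>
    if !(PySem.Set.contains st.1 p.1) && !(PySem.Set.contains st.1 p.2) then
      (PySem.Set.add (PySem.Set.add st.1 p.1) p.2, st.2 + 1)
    else st) (PySem.Set.empty, 0)
  st.2

def max_sum_pair_alt (A : List Int) : Int :=
  let n : Int := (A.length : Int)
  let cand : PySem.Dict Int (List (Int × Int)) :=
    (PySem.List.pyRange 0 n 1).foldl (fun d i =>
      (PySem.List.pyRange (i + 1) n 1).foldl (fun d j =>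
        d.modify (PySem.List.pyGetD A i 0 + PySem.List.pyGetD A j 0) [] (· ++ [(i, j)])) d)
      PySem.Dict.empty
  cand.values.foldl (fun best pairs => max best (msp_greedyCount pairs)) 0

-- ===== PRECONDITION & SPEC =====
def Spec_max_sum_pair (A : List Int) (out : Int) : Prop := out = max_sum_pair_alt A
instance (A : List Int) (out : Int) : Decidable (Spec_max_sum_pair A out) := by unfold Spec_max_sum_pair; infer_instance

-- ===== CLAIM (what is proved, stated in full; the proofs are below) =====
def Claim_equal_max_sum_pair : Prop := ∀ (A : List Int), Dom_max_sum_pair A → Spec_max_sum_pair A (max_sum_pair A)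

-- ===== LEMMAS AND PROOFS =====

-- The flat list of index pairs (i, j), i < j, in the order both double loops visit them.
def mspPairs (A : List Int) : List (Int × Int) :=
  (PySem.List.pyRange 0 (A.length : Int) 1).flatMap
    (fun i => (PySem.List.pyRange (i + 1) (A.length : Int) 1).map (fun j => (i, j)))

def mspKey (A : List Int) (p : Int × Int) : Int :=
  PySem.List.pyGetD A p.1 0 + PySem.List.pyGetD A p.2 0

-- A's loop body, as a step on (dict, pair).
def mspStepA (A : List Int) (h : PySem.Dict Int (List Int)) (p : Int × Int) :
    PySem.Dict Int (List Int) :=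
  let s := mspKey A p
  if h.contains s then
    if !((h.getD s []).contains p.1) && !((h.getD s []).contains p.2) then
      h.insert s (h.getD s [] ++ [p.1] ++ [p.2])
    else h
  else h.insert s [p.1, p.2]

-- B's phase-1 loop body.
def mspStepB (A : List Int) (d : PySem.Dict Int (List (Int × Int))) (p : Int × Int) :
    PySem.Dict Int (List (Int × Int)) :=
  d.modify (mspKey A p) [] (· ++ [p])

-- A's per-sum greedy accumulation of accepted indices.
def mspAcc (acc : List Int) (p : Int × Int) : List Int :=
  if !(acc.contains p.1) && !(acc.contains p.2) then acc ++ [p.1] ++ [p.2] else acc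

lemma foldl_flatMap' {α β γ : Type} (l : List α) (g : α → List β) (f : γ → β → γ) (init : γ) :
    (l.flatMap g).foldl f init = l.foldl (fun acc x => (g x).foldl f acc) init := by
  induction l generalizing init with
  | nil => rfl
  | cons a t ih => simp [List.flatMap_cons, List.foldl_append, ih]

lemma max_sum_pair_eq (A : List Int) :
    max_sum_pair A =
      let hash := (mspPairs A).foldl (mspStepA A) PySem.Dict.empty
      PySem.Int.floordiv
        (hash.keys.foldl (fun m k =>
          if ((hash.getD k []).length : Int) > m then ((hash.getD k []).length : Int) else m) 0) 2 := by
  simp only [max_sum_pair, mspPairs, foldl_flatMap', List.foldl_map, mspStepA, mspKey]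

lemma max_sum_pair_alt_eq (A : List Int) :
    max_sum_pair_alt A =
      let cand := (mspPairs A).foldl (mspStepB A) PySem.Dict.empty
      cand.values.foldl (fun best pairs => max best (msp_greedyCount pairs)) 0 := by
  simp only [max_sum_pair_alt, mspPairs, foldl_flatMap', List.foldl_map, mspStepB, mspKey]

-- One A-step, seen through getD: per-sum greedy accumulation.
lemma getD_mspStepA (A : List Int) (h : PySem.Dict Int (List Int)) (p : Int × Int) (s : Int) :
    ((mspStepA A h p).getD s []) =
      if s = mspKey A p then mspAcc (h.getD (mspKey A p) []) p else h.getD s [] := by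
  unfold mspStepA mspAcc
  by_cases hs : s = mspKey A p
  · rw [if_pos hs, ← hs]
    by_cases hc : h.contains s
    · rw [if_pos hc]
      by_cases hij : (!((h.getD s []).contains p.1) && !((h.getD s []).contains p.2)) = true
      · rw [if_pos hij, if_pos hij, PySem.Dict.getD_insert_self]
      · rw [if_neg hij, if_neg hij]
    · have hv : h.getD s [] = [] :=
        PySem.Dict.getD_of_not_contains h [] (by simpa using hc)
      rw [if_neg (by simpa using hc), PySem.Dict.getD_insert_self, hv]
      simp
  · rw [if_neg hs]
    by_cases hc : h.contains (mspKey A p)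
    · rw [if_pos hc]
      by_cases hij : (!((h.getD (mspKey A p) []).contains p.1) && !((h.getD (mspKey A p) []).contains p.2)) = true
      · rw [if_pos hij, PySem.Dict.getD_insert_of_ne h _ _ hs]
      · rw [if_neg hij]
    · rw [if_neg (by simpa using hc), PySem.Dict.getD_insert_of_ne h _ _ hs]

lemma getD_foldl_mspStepA (A : List Int) (ps : List (Int × Int))
    (h : PySem.Dict Int (List Int)) (s : Int) :
    ((ps.foldl (mspStepA A) h).getD s []) =
      (ps.filter (fun p => mspKey A p == s)).foldl mspAcc (h.getD s []) := by
  induction ps generalizing h with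
  | nil => rfl
  | cons p t ih =>
    simp only [List.foldl_cons, List.filter_cons]
    by_cases hk : mspKey A p = s
    · have hb : (mspKey A p == s) = true := by simpa using hk
      rw [hb, if_pos rfl, List.foldl_cons, ih, getD_mspStepA, if_pos hk.symm, hk]
    · have hb : (mspKey A p == s) = false := by simpa using hk
      rw [hb]
      simp only [Bool.false_eq_true, if_false]
      rw [ih, getD_mspStepA, if_neg (Ne.symm hk)]

lemma getD_mspStepB (A : List Int) (d : PySem.Dict Int (List (Int × Int))) (p : Int × Int) (s : Int) :
    ((mspStepB A d p).getD s []) =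
      if s = mspKey A p then d.getD (mspKey A p) [] ++ [p] else d.getD s [] := by
  unfold mspStepB
  by_cases hk : s = mspKey A p
  · subst hk; rw [if_pos rfl, PySem.Dict.getD_modify_self]
  · rw [if_neg hk, PySem.Dict.getD_modify_of_ne d [] (· ++ [p]) hk]

lemma getD_foldl_mspStepB (A : List Int) (ps : List (Int × Int))
    (d : PySem.Dict Int (List (Int × Int))) (s : Int) :
    ((ps.foldl (mspStepB A) d).getD s []) =
      d.getD s [] ++ (ps.filter (fun p => mspKey A p == s)) := by
  induction ps generalizing d with
  | nil => simp
  | cons p t ih =>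
    simp only [List.foldl_cons, List.filter_cons]
    by_cases hk : mspKey A p = s
    · have hb : (mspKey A p == s) = true := by simpa using hk
      rw [hb, if_pos rfl, ih, getD_mspStepB, if_pos hk.symm, hk]
      simp
    · have hb : (mspKey A p == s) = false := by simpa using hk
      rw [hb]
      simp only [Bool.false_eq_true, if_false]
      rw [ih, getD_mspStepB, if_neg (Ne.symm hk)]

-- Both dict-building folds produce the same key list.
lemma keys_mspStepA (A : List Int) (h : PySem.Dict Int (List Int)) (p : Int × Int) :
    (mspStepA A h p).keys = PySem.Set.add h.keys (mspKey A p) := by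
  unfold mspStepA PySem.Set.add
  by_cases hc : h.contains (mspKey A p)
  · have hm : PySem.Set.contains h.keys (mspKey A p) = true := by
      simpa [PySem.Set.contains, List.contains_eq_mem] using
        (PySem.Dict.contains_iff_mem_keys h (mspKey A p)).1 hc
    rw [if_pos hc, if_pos hm]
    by_cases hij : (!((h.getD (mspKey A p) []).contains p.1) && !((h.getD (mspKey A p) []).contains p.2)) = true
    · rw [if_pos hij, PySem.Dict.keys_insert_of_contains h _ hc]
    · rw [if_neg hij]
  · have hm : PySem.Set.contains h.keys (mspKey A p) = false := by
      simp only [PySem.Set.contains, List.contains_eq_mem, decide_eq_false_iff_not]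
      exact fun hmem => hc ((PySem.Dict.contains_iff_mem_keys h _).2 hmem)
    rw [if_neg hc, if_neg (by simpa [PySem.Set.contains, List.contains_eq_mem] using hm),
        PySem.Dict.keys_insert_of_not_contains h _ (by simpa using hc)]

lemma keys_mspStepB (A : List Int) (d : PySem.Dict Int (List (Int × Int))) (p : Int × Int) :
    (mspStepB A d p).keys = PySem.Set.add d.keys (mspKey A p) := by
  unfold mspStepB PySem.Set.add
  rw [PySem.Dict.keys_modify]
  by_cases hc : d.contains (mspKey A p)
  · have hm : PySem.Set.contains d.keys (mspKey A p) = true := by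
      simpa [PySem.Set.contains, List.contains_eq_mem] using
        (PySem.Dict.contains_iff_mem_keys d (mspKey A p)).1 hc
    rw [if_pos hm, PySem.Dict.keys_insert_of_contains d _ hc]
  · have hm : PySem.Set.contains d.keys (mspKey A p) = false := by
      simp only [PySem.Set.contains, List.contains_eq_mem, decide_eq_false_iff_not]
      exact fun hmem => hc ((PySem.Dict.contains_iff_mem_keys d _).2 hmem)
    rw [if_neg (by simpa [PySem.Set.contains, List.contains_eq_mem] using hm),
        PySem.Dict.keys_insert_of_not_contains d _ (by simpa using hc)]

lemma keys_foldl_eq (A : List Int) (ps : List (Int × Int))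
    (h : PySem.Dict Int (List Int)) (d : PySem.Dict Int (List (Int × Int)))
    (hkeys : h.keys = d.keys) :
    (ps.foldl (mspStepA A) h).keys = (ps.foldl (mspStepB A) d).keys := by
  induction ps generalizing h d with
  | nil => exact hkeys
  | cons p t ih =>
    simp only [List.foldl_cons]
    exact ih _ _ (by rw [keys_mspStepA, keys_mspStepB, hkeys])

lemma mspAcc_len (xs : List Int) (m : List (Int × Int)) :
    (xs.length : Int) ≤ ((m.foldl mspAcc xs).length : Int) ∧
      2 ∣ ((m.foldl mspAcc xs).length : Int) - (xs.length : Int) := by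
  induction m generalizing xs with
  | nil => simp
  | cons q tq ihq =>
    simp only [List.foldl_cons, mspAcc]
    by_cases hq : !(xs.contains q.1) && !(xs.contains q.2)
    · rcases ihq (xs ++ [q.1] ++ [q.2]) with ⟨hle, hdvd⟩
      rw [if_pos hq]
      refine ⟨by simp at hle ⊢; omega, ?_⟩
      rcases hdvd with ⟨k, hk⟩
      exact ⟨k + 1, by simp at hk ⊢; omega⟩
    · rw [if_neg hq]; exact ihq xs

-- Greedy invariant: B's (used, count) fold tracks A's accepted-index list; 2·count = its length.
lemma greedy_inv (l : List (Int × Int)) (hne : ∀ p ∈ l, p.1 ≠ p.2)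
    (acc : List Int) (c : Int) :
    (l.foldl (fun (st : PySem.Set Int × Int) p =>
        if !(PySem.Set.contains st.1 p.1) && !(PySem.Set.contains st.1 p.2) then
          (PySem.Set.add (PySem.Set.add st.1 p.1) p.2, st.2 + 1)
        else st) (acc, c)) =
      (l.foldl mspAcc acc,
       c + ((l.foldl mspAcc acc).length - acc.length) / 2) := by
  induction l generalizing acc c with
  | nil => simp
  | cons p t ih =>
    have hppe := hne p (List.mem_cons_self ..)
    have hnt : ∀ q ∈ t, q.1 ≠ q.2 := fun q hq => hne q (List.mem_cons_of_mem _ hq)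
    simp only [List.foldl_cons]
    by_cases hfresh : (!(PySem.Set.contains acc p.1) && !(PySem.Set.contains acc p.2)) = true
    · have hfresh' : (!(acc.contains p.1) && !(acc.contains p.2)) = true := hfresh
      have h12 : acc.contains p.1 = false ∧ acc.contains p.2 = false := by
        constructor <;> revert hfresh' <;> cases hA : acc.contains p.1 <;>
          cases hB : acc.contains p.2 <;> simp
      obtain ⟨h1, h2⟩ := h12
      have hne1 : p.1 ∉ acc := by simpa using h1
      have hne2 : p.2 ∉ acc := by simpa using h2
      have hadd : PySem.Set.add (PySem.Set.add acc p.1) p.2 = acc ++ [p.1] ++ [p.2] := by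
        simp [PySem.Set.add, PySem.Set.contains, hne1, hne2, Ne.symm hppe]
      have hstA : mspAcc acc p = acc ++ [p.1] ++ [p.2] := by
        simp only [mspAcc, if_pos hfresh']
      rw [if_pos hfresh, hadd, ih hnt, hstA]
      congr 1
      rcases mspAcc_len (acc ++ [p.1] ++ [p.2]) t with ⟨hle, ⟨k, hk⟩⟩
      simp only [List.length_append, List.length_singleton] at hle hk ⊢
      push_cast at hle hk ⊢
      omega
    · have hfresh' : ¬ (!(acc.contains p.1) && !(acc.contains p.2)) = true := hfresh
      have hstA : mspAcc acc p = acc := by simp only [mspAcc, if_neg hfresh']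
      rw [if_neg hfresh, ih hnt, hstA]

lemma msp_greedyCount_eq (l : List (Int × Int)) (hne : ∀ p ∈ l, p.1 ≠ p.2) :
    2 * msp_greedyCount l = ((l.foldl mspAcc []).length : Int) := by
  unfold msp_greedyCount
  show 2 * (List.foldl (fun (st : PySem.Set Int × Int) p =>
      if !(PySem.Set.contains st.1 p.1) && !(PySem.Set.contains st.1 p.2) then
        (PySem.Set.add (PySem.Set.add st.1 p.1) p.2, st.2 + 1)
      else st) ([], 0) l).2 = ((l.foldl mspAcc []).length : Int)
  rw [greedy_inv l hne [] 0]
  rcases mspAcc_len [] l with ⟨hle, ⟨k, hk⟩⟩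
  simp only [List.length_nil, Int.natCast_zero, Int.sub_zero] at hle hk ⊢
  omega

lemma mspPairs_ne (A : List Int) : ∀ p ∈ mspPairs A, p.1 ≠ p.2 := by
  intro p hp
  simp only [mspPairs, List.mem_flatMap, List.mem_map] at hp
  rcases hp with ⟨i, hi, j, hj, rfl⟩
  have := (PySem.List.mem_pyRange_one).1 hj
  simp only
  omega

-- max over keys commutes with doubling and with //2.
lemma foldl_max_double (ks : List Int) (f g : Int → Int)
    (hfg : ∀ k ∈ ks, f k = 2 * g k) (b : Int) :
    ks.foldl (fun m k => max m (f k)) (2 * b) = 2 * ks.foldl (fun m k => max m (g k)) b := by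
  induction ks generalizing b with
  | nil => rfl
  | cons k t ih =>
    simp only [List.foldl_cons]
    rw [hfg k (List.mem_cons_self ..), show max (2 * b) (2 * g k) = 2 * max b (g k) from by omega]
    exact ih (fun q hq => hfg q (List.mem_cons_of_mem _ hq)) _

lemma if_gt_eq_max (m x : Int) : (if x > m then x else m) = max m x := by
  split_ifs with h <;> omega

-- ===== VERDICT (by name: the statement is the Claim_ definition above) =====
theorem max_sum_pair_spec : Claim_equal_max_sum_pair := by
  intro A _
  unfold Spec_max_sum_pair
  rw [max_sum_pair_eq, max_sum_pair_alt_eq]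
  simp only
  set hash := (mspPairs A).foldl (mspStepA A) PySem.Dict.empty with hhash
  set cand := (mspPairs A).foldl (mspStepB A) PySem.Dict.empty with hcand
  have hnodup : cand.keys.Nodup := by
    rw [hcand]
    exact PySem.Dict.nodup_keys_foldl_modify_key (mspPairs A) (mspKey A) []
      (fun d p => (· ++ [p])) PySem.Dict.empty (by simp)
  have hkeys : hash.keys = cand.keys := keys_foldl_eq A (mspPairs A) _ _ rfl
  -- rewrite B's values-fold as a keys-fold
  have hvals : cand.values.foldl (fun best pairs => max best (msp_greedyCount pairs)) 0
      = cand.keys.foldl (fun best k => max best (msp_greedyCount (cand.getD k []))) 0 := by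
    rw [PySem.Dict.values_eq_map_keys cand hnodup [], List.foldl_map]
  rw [hvals, ← hkeys]
  -- rewrite A's running-max loop as a max-fold
  have hA : hash.keys.foldl (fun m k =>
      if ((hash.getD k []).length : Int) > m then ((hash.getD k []).length : Int) else m) 0
      = hash.keys.foldl (fun m k => max m ((hash.getD k []).length : Int)) 0 := by
    apply PySem.List.foldl_congr_mem
    intro acc k _
    exact if_gt_eq_max acc _
  rw [hA]
  have hdouble : ∀ k ∈ hash.keys,
      ((hash.getD k []).length : Int) = 2 * msp_greedyCount (cand.getD k []) := by
    intro k _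
    rw [hhash, hcand, getD_foldl_mspStepA, getD_foldl_mspStepB]
    simp only [PySem.Dict.getD_empty, List.nil_append]
    rw [msp_greedyCount_eq _ (fun p hp => mspPairs_ne A p (List.mem_of_mem_filter hp))]
  have hfold := foldl_max_double hash.keys _ _ hdouble 0
  rw [show (2 : Int) * 0 = 0 from by ring] at hfold
  rw [hfold, PySem.Int.floordiv]
  exact Int.mul_fdiv_cancel_left _ (by norm_num)
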